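-- pv_equiv track=rewrite | github.com/rcastano/cpachecker-1 | scripts/table-generator.py | getLimitRow
-- ===== SOURCE A (Python) =====
-- def getLimitRow(listOfTests, testWidths):
--     '''
--     get limitRow, each cell of it spans over all tests with this limit
--     '''
--
--     limitRow = '<tr><td>Limits</td>'
--     limitWidth = 0
--     limit = (listOfTests[0].get('timelimit'), listOfTests[0].get('memlimit'))
--
--     for result, width in zip(listOfTests, testWidths):
--         newLimit = (result.get('timelimit'), result.get('memlimit'))
--         if newLimit != limit:
--             limitRow += '<td colspan="{0}">timelimit: {1}, memlimit: {2}</td>'\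
--                             .format(limitWidth, *limit)
--             limitWidth = 0
--             limit = newLimit
--         limitWidth += width
--     limitRow += '<td colspan="{0}">timelimit: {1}, memlimit: {2}</td></tr>'\
--                     .format(limitWidth, *limit)
--
--     return limitRow
-- ===== SOURCE B (Python) =====
-- def getLimitRow(listOfTests, testWidths):
--     keys = [(t.get('timelimit'), t.get('memlimit')) for t in listOfTests]
--     # run-length-encode the (key, width) sequence back to front: fold from the
--     # right, merging each element into the front run when its key matches
--     runs = []  # kept reversed while building: runs[-1] is the front run
--     for key, width in reversed(list(zip(keys, testWidths))):
--         if runs and runs[-1][0] == key: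
--             runs[-1] = (key, width + runs[-1][1])
--         else:
--             runs.append((key, width))
--     cells = ['<td colspan="{0}">timelimit: {1}, memlimit: {2}</td>'.format(width, *key)
--              for key, width in reversed(runs)]
--     return '<tr><td>Limits</td>' + ''.join(cells) + '</tr>'
-- ===== Notes on version B (the rewrite author's own statement) =====
-- stated objective: alternative
-- what changed: Replaces A's forward state machine (open-run width flushed into a growing row string on each key change, plus a final flush after the loop) by a fold from the right that builds the run-length encoding back to front by merge-or-prepend, then renders every run in one comprehension and joins; Pre_ excludes only empty listOfTests, where A raises IndexError at listOfTests[0].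
-- intended difference: On non-empty listOfTests with empty testWidths A returns a row containing a spurious '<td colspan="0">' cell describing the first test's limits although there are no test columns; B returns the row with no limit cells, the intended rendering when nothing is displayed. — e.g. on getLimitRow([[("timelimit", some "60"), ("memlimit", some "2G")]], []): A returns "<tr><td>Limits</td><td colspan=\"0\">timelimit: 60, memlimit: 2G</td></tr>", B returns "<tr><td>Limits</td></tr>"
import Mathlib
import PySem

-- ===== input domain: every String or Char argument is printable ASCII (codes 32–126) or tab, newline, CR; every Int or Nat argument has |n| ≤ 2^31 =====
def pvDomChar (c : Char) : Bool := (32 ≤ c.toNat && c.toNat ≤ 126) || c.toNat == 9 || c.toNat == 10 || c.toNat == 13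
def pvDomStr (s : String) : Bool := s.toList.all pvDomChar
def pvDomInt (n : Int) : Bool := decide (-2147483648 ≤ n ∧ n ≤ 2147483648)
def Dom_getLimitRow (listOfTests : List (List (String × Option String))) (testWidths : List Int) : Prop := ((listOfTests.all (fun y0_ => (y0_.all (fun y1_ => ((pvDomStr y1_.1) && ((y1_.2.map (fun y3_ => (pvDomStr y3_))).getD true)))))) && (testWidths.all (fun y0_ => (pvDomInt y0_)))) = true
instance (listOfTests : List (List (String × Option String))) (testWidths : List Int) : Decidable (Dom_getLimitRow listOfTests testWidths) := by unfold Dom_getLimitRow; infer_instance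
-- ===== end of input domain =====

-- B folds the zipped (limit, width) sequence from the right, building the
-- run-length encoding back to front by merge-or-prepend, then renders all
-- cells in one pass and joins (objective: alternative decomposition, same cost).

-- shared helpers: both Pythons compute the same limit pair and the same format string
-- result.get('timelimit') / result.get('memlimit'): first-match dict lookup with default None
def limitKey (r : List (String × Option String)) : Option String × Option String :=
  ((PySem.Dict.mk r).getD "timelimit" none, (PySem.Dict.mk r).getD "memlimit" none)

-- str(x) for x : Optional[str] as inserted by str.format
def fmtOpt : Option String → String
  | none => "None"
  | some s => s

-- '<td colspan="{0}">timelimit: {1}, memlimit: {2}</td>'.format(w, *l)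
def cellStr (l : Option String × Option String) (w : Int) : String :=
  "<td colspan=\"" ++ PySem.Int.toStr w ++ "\">timelimit: " ++ fmtOpt l.1
    ++ ", memlimit: " ++ fmtOpt l.2 ++ "</td>"

-- ===== PORT A =====
-- A's for-loop over zip(listOfTests, testWidths), state (limitRow, limitWidth, limit)
def getLimitRowLoop : List (List (String × Option String) × Int) → String → Int →
    (Option String × Option String) → String × Int × (Option String × Option String)
  | [], row, width, limit => (row, width, limit)
  | (r, w) :: rest, row, width, limit =>
    let newLimit := limitKey r
    let st := if newLimit ≠ limit then (row ++ cellStr limit width, (0 : Int), newLimit)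
              else (row, width, limit)
    getLimitRowLoop rest st.1 (st.2.1 + w) st.2.2

def getLimitRow (listOfTests : List (List (String × Option String))) (testWidths : List Int) : String :=
  match listOfTests with
  | [] => ""   -- listOfTests[0] raises IndexError; excluded by Pre_
  | first :: _ =>
    let limit := limitKey first
    let st := getLimitRowLoop (listOfTests.zip testWidths) "<tr><td>Limits</td>" 0 limit
    st.1 ++ cellStr st.2.2 st.2.1 ++ "</tr>"

-- ===== PORT B =====
-- Source B: 'if runs and runs[-1][0] == key: runs[-1] = (key, width + runs[-1][1]) else: runs.append(...)'
def mergeRun (runs : List ((Option String × Option String) × Int))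
    (p : (Option String × Option String) × Int) :
    List ((Option String × Option String) × Int) :=
  match runs.getLast? with
  | some last => if last.1 = p.1 then runs.dropLast ++ [(p.1, p.2 + last.2)] else runs ++ [p]
  | none => runs ++ [p]

def getLimitRow_alt (listOfTests : List (List (String × Option String))) (testWidths : List Int) : String :=
  let keys := listOfTests.map limitKey
  -- for key, width in reversed(list(zip(keys, testWidths))): merge-or-append
  let runs := ((keys.zip testWidths).reverse).foldl mergeRun []
  let cells := runs.reverse.map (fun c => cellStr c.1 c.2)
  "<tr><td>Limits</td>" ++ PySem.Str.join "" cells ++ "</tr>"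

-- ===== PRECONDITION & SPEC =====
-- Pre_ excludes only the empty listOfTests, on which A raises IndexError at listOfTests[0]
def Pre_getLimitRow (listOfTests : List (List (String × Option String))) (testWidths : List Int) : Prop :=
  listOfTests ≠ []
instance (listOfTests : List (List (String × Option String))) (testWidths : List Int) : Decidable (Pre_getLimitRow listOfTests testWidths) := by unfold Pre_getLimitRow; infer_instance

def pvWitness_getLimitRow : (List (List (String × Option String))) × List Int :=
  ([[("timelimit", some "60")], [("memlimit", some "2G")]], [2, 3])

-- On non-empty listOfTests with empty testWidths A returns a row with a spurious
-- '<td colspan="0">' cell for the first test's limits although there are no test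
-- columns; B returns the row with no limit cells, the intended rendering.
def D_getLimitRow (listOfTests : List (List (String × Option String))) (testWidths : List Int) : Prop :=
  listOfTests ≠ [] ∧ testWidths = []
instance (listOfTests : List (List (String × Option String))) (testWidths : List Int) : Decidable (D_getLimitRow listOfTests testWidths) := by unfold D_getLimitRow; infer_instance

def Spec_getLimitRow (listOfTests : List (List (String × Option String))) (testWidths : List Int) (out : String) : Prop := ¬ D_getLimitRow listOfTests testWidths → out = getLimitRow_alt listOfTests testWidths
instance (listOfTests : List (List (String × Option String))) (testWidths : List Int) (out : String) : Decidable (Spec_getLimitRow listOfTests testWidths out) := by unfold Spec_getLimitRow; infer_instance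

def pvDiffWitness_getLimitRow : (List (List (String × Option String))) × List Int :=
  ([[("timelimit", some "60"), ("memlimit", some "2G")]], [])
def pvDiffWitnessOut_getLimitRow : String × String :=
  ("<tr><td>Limits</td><td colspan=\"0\">timelimit: 60, memlimit: 2G</td></tr>",
   "<tr><td>Limits</td></tr>")

-- ===== CLAIM (what is proved, stated in full; the proofs are below) =====
def Claim_unchanged_getLimitRow : Prop := ∀ (listOfTests : List (List (String × Option String))) (testWidths : List Int), Dom_getLimitRow listOfTests testWidths → Pre_getLimitRow listOfTests testWidths → Spec_getLimitRow listOfTests testWidths (getLimitRow listOfTests testWidths)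
def Claim_changed_getLimitRow : Prop := Dom_getLimitRow (pvDiffWitness_getLimitRow.1) (pvDiffWitness_getLimitRow.2) ∧ Pre_getLimitRow (pvDiffWitness_getLimitRow.1) (pvDiffWitness_getLimitRow.2) ∧ D_getLimitRow (pvDiffWitness_getLimitRow.1) (pvDiffWitness_getLimitRow.2) ∧ getLimitRow (pvDiffWitness_getLimitRow.1) (pvDiffWitness_getLimitRow.2) = pvDiffWitnessOut_getLimitRow.1 ∧ getLimitRow_alt (pvDiffWitness_getLimitRow.1) (pvDiffWitness_getLimitRow.2) = pvDiffWitnessOut_getLimitRow.2 ∧ pvDiffWitnessOut_getLimitRow.1 ≠ pvDiffWitnessOut_getLimitRow.2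
def Claim_exact_getLimitRow : Prop := ∀ (listOfTests : List (List (String × Option String))) (testWidths : List Int), Dom_getLimitRow listOfTests testWidths → Pre_getLimitRow listOfTests testWidths → D_getLimitRow listOfTests testWidths → getLimitRow listOfTests testWidths ≠ getLimitRow_alt listOfTests testWidths

-- ===== LEMMAS AND PROOFS =====
theorem joinEmpty_cons (x : String) (xs : List String) :
    PySem.Str.join "" (x :: xs) = x ++ PySem.Str.join "" xs := by
  cases xs with
  | nil => simp [PySem.Str.join, PySem.Chars.join_singleton, PySem.Chars.join_nil]
  | cons y ys => simp [PySem.Str.join, PySem.Chars.join_cons_cons]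

-- proof helper: runs of A's loop as a state-passing recursion (open run (k, w))
def groupRunsGo : (Option String × Option String) → Int →
    List (List (String × Option String) × Int) →
    List ((Option String × Option String) × Int)
  | k, acc, [] => [(k, acc)]
  | k, acc, (r, w) :: rest =>
    if limitKey r = k then groupRunsGo k (acc + w) rest
    else (k, acc) :: groupRunsGo (limitKey r) w rest

theorem loop_cons_eq {r : List (String × Option String)} {limit : Option String × Option String}
    (h : limitKey r = limit) (w : Int) (rest : List (List (String × Option String) × Int))
    (row : String) (width : Int) :
    getLimitRowLoop ((r, w) :: rest) row width limit = getLimitRowLoop rest row (width + w) limit := by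
  simp [getLimitRowLoop, h]

theorem loop_cons_ne {r : List (String × Option String)} {limit : Option String × Option String}
    (h : ¬ limitKey r = limit) (w : Int) (rest : List (List (String × Option String) × Int))
    (row : String) (width : Int) :
    getLimitRowLoop ((r, w) :: rest) row width limit
      = getLimitRowLoop rest (row ++ cellStr limit width) (0 + w) (limitKey r) := by
  simp [getLimitRowLoop, h]

-- A's loop followed by its final cell equals the concatenation of the run cells,
-- where (limit, width) is the currently open run
theorem loop_eq_runs (ps : List (List (String × Option String) × Int))
    (row : String) (width : Int) (limit : Option String × Option String) :
    (getLimitRowLoop ps row width limit).1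
      ++ cellStr (getLimitRowLoop ps row width limit).2.2 (getLimitRowLoop ps row width limit).2.1
    = row ++ PySem.Str.join "" ((groupRunsGo limit width ps).map (fun c => cellStr c.1 c.2)) := by
  induction ps generalizing row width limit with
  | nil =>
    simp [getLimitRowLoop, groupRunsGo, PySem.Str.join, PySem.Chars.join_singleton]
  | cons p rest ih =>
    obtain ⟨r, w⟩ := p
    by_cases h : limitKey r = limit
    · rw [loop_cons_eq h, ih]
      simp only [groupRunsGo, if_pos h]
    · rw [loop_cons_ne h, ih]
      simp only [groupRunsGo, if_neg h, List.map_cons, joinEmpty_cons, zero_add]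
      simp [String.append_assoc]

-- proof helper: B's run-length encoding as a fold from the right (merge into head)
def runsR : List ((Option String × Option String) × Int) → List ((Option String × Option String) × Int)
  | [] => []
  | (k, w) :: rest =>
    match runsR rest with
    | [] => [(k, w)]
    | (k', w') :: t => if k' = k then (k, w + w') :: t else (k, w) :: (k', w') :: t

-- B's reversed foldl with merge-or-append computes runsR
theorem foldl_mergeRun_eq_runsR (ps : List ((Option String × Option String) × Int)) :
    (ps.reverse.foldl mergeRun []).reverse = runsR ps := by
  rw [List.foldl_reverse]
  induction ps with
  | nil => simp [runsR]
  | cons p rest ih =>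
    obtain ⟨k, w⟩ := p
    simp only [List.foldr_cons]
    have hRform : rest.foldr (fun x acc => mergeRun acc x) []
        = (runsR rest).reverse := by rw [← ih, List.reverse_reverse]
    cases hruns : runsR rest with
    | nil =>
      rw [hRform, hruns]
      simp [runsR, hruns, mergeRun]
    | cons q t =>
      obtain ⟨k', w'⟩ := q
      rw [hRform, hruns]
      have hlast : ((k', w') :: t).reverse.getLast? = some (k', w') := by
        rw [List.getLast?_reverse]; rfl
      by_cases hk : k' = k
      · have hdrop : ((k', w') :: t).reverse.dropLast = t.reverse := by
          simp [List.reverse_cons]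
        simp [runsR, hruns, mergeRun, hdrop, hk]
      · simp [runsR, hruns, mergeRun, hk]

-- A's open-run recursion and B's foldr-RLE produce the same runs
theorem groupRunsGo_eq_runsR (ps : List (List (String × Option String) × Int))
    (k : Option String × Option String) (w : Int) :
    groupRunsGo k w ps = runsR ((k, w) :: ps.map (fun p => (limitKey p.1, p.2))) := by
  induction ps generalizing k w with
  | nil => simp [groupRunsGo, runsR]
  | cons p rest ih =>
    obtain ⟨r, w1⟩ := p
    by_cases h : limitKey r = k
    · rw [show groupRunsGo k w ((r, w1) :: rest) = groupRunsGo k (w + w1) rest by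
        simp [groupRunsGo, h]]
      rw [ih]
      simp only [List.map_cons]
      cases hr : runsR (rest.map (fun p => (limitKey p.1, p.2))) with
      | nil => simp [runsR, hr, h]
      | cons q t =>
        obtain ⟨k2, w2⟩ := q
        by_cases h2 : k2 = limitKey r
        · simp [runsR, hr, h, h2]; ring
        · have h2' : ¬ k2 = k := by rw [← h]; exact h2
          simp [runsR, hr, h, h2, h2']
    · rw [show groupRunsGo k w ((r, w1) :: rest)
          = (k, w) :: groupRunsGo (limitKey r) w1 rest by simp [groupRunsGo, h]]
      rw [ih]
      simp only [List.map_cons]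
      have hkey : ∃ w' t, runsR ((limitKey r, w1) :: rest.map (fun p => (limitKey p.1, p.2)))
          = (limitKey r, w') :: t := by
        cases hr : runsR (rest.map (fun p => (limitKey p.1, p.2))) with
        | nil => exact ⟨w1, [], by simp [runsR, hr]⟩
        | cons q t =>
          obtain ⟨k2, w2⟩ := q
          by_cases h2 : k2 = limitKey r
          · exact ⟨w1 + w2, t, by simp [runsR, hr, h2]⟩
          · exact ⟨w1, (k2, w2) :: t, by simp [runsR, hr, h2]⟩
      obtain ⟨w', t, ht⟩ := hkey
      conv_rhs => rw [runsR]
      rw [ht]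
      simp [h]

theorem keys_zip (lot : List (List (String × Option String))) (tw : List Int) :
    (lot.map limitKey).zip tw = (lot.zip tw).map (fun p => (limitKey p.1, p.2)) := by
  induction lot generalizing tw with
  | nil => simp
  | cons t r ih => cases tw with
    | nil => simp
    | cons w ws => simp [ih]

theorem length_append3 (a b c : String) : (a ++ b ++ c).length = a.length + b.length + c.length := by
  simp [String.length_append]

-- ===== VERDICT (by name: the statement is the Claim_ definition above) =====
theorem getLimitRow_spec : Claim_unchanged_getLimitRow := by
  intro lot tw _ hpre hnd
  match lot, hpre with
  | first :: rest, _ =>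
    cases tw with
    | nil => exact absurd ⟨by simp, rfl⟩ hnd
    | cons w0 ws =>
      show (getLimitRowLoop ((first :: rest).zip (w0 :: ws)) "<tr><td>Limits</td>" 0 (limitKey first)).1
          ++ cellStr _ _ ++ "</tr>" = _
      rw [show (first :: rest).zip (w0 :: ws) = (first, w0) :: rest.zip ws from rfl,
        loop_cons_eq rfl, loop_eq_runs]
      have hB : getLimitRow_alt (first :: rest) (w0 :: ws)
          = "<tr><td>Limits</td>" ++ PySem.Str.join ""
              (((((first :: rest).map limitKey).zip (w0 :: ws)).reverse.foldl mergeRun []).reverse.map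
                (fun c => cellStr c.1 c.2)) ++ "</tr>" := rfl
      rw [hB, keys_zip, show ((first :: rest).zip (w0 :: ws)).map (fun p => (limitKey p.1, p.2))
            = (limitKey first, w0) :: (rest.zip ws).map (fun p => (limitKey p.1, p.2)) from rfl,
        foldl_mergeRun_eq_runsR, ← groupRunsGo_eq_runsR]
      simp [String.append_assoc, zero_add]

theorem getLimitRow_changed : Claim_changed_getLimitRow := by
  unfold Claim_changed_getLimitRow; decide

theorem getLimitRow_tight : Claim_exact_getLimitRow := by
  intro lot tw _ _ hd heq
  obtain ⟨hne, htw⟩ := hd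
  match lot with
  | first :: rest =>
    subst htw
    have hA : getLimitRow (first :: rest) []
        = "<tr><td>Limits</td>" ++ cellStr (limitKey first) 0 ++ "</tr>" := by
      simp [getLimitRow, getLimitRowLoop]
    have hB : getLimitRow_alt (first :: rest) []
        = "<tr><td>Limits</td>" ++ "" ++ "</tr>" := by
      simp [getLimitRow_alt, PySem.Str.join, PySem.Chars.join_nil]
    rw [hA, hB] at heq
    have := congrArg String.length heq
    rw [length_append3, length_append3] at this
    have hc : 0 < (cellStr (limitKey first) 0).length := by
      simp [cellStr, String.length_append]
      exact Or.inl <| Or.inl <| Or.inl <| Or.inl <| Or.inl <| Or.inl (by decide)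
    have h0 : ("" : String).length = 0 := rfl
    rw [h0] at this
    omega
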